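-- pv_equiv track=rewrite | github.com/robertvirany/pandas-excel | translate_formulas.py | split_range_reference
-- ===== SOURCE A (Python) =====
-- from typing import Dict, Iterable, Iterator, List, Optional, Sequence, Tuple
--
-- def split_range_reference(reference: str, default_sheet: str) -> Optional[Tuple[str, str]]:
--     token = reference.strip()
--     if not token:
--         return None
--     sheet = default_sheet
--     if "!" not in token:
--         return sheet, token
--     if token[0] == "'":
--         idx = 1
--         builder: List[str] = []
--         while idx < len(token):
--             ch = token[idx]
--             if ch == "'":
--                 if idx + 1 < len(token) and token[idx + 1] == "'":
--                     builder.append("'")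
--                     idx += 2
--                     continue
--                 idx += 1
--                 break
--             builder.append(ch)
--             idx += 1
--         sheet = "".join(builder)
--         if idx < len(token) and token[idx] == "!":
--             idx += 1
--         ref_part = token[idx:]
--         return sheet, ref_part
--     sheet_part, ref_part = token.split("!", 1)
--     return sheet_part, ref_part
-- ===== SOURCE B (Python) =====
-- def split_range_reference(reference, default_sheet):
--     token = reference.strip()
--     if not token:
--         return None
--     if "!" not in token:
--         return default_sheet, token
--     if token[0] != "'":
--         cut = token.find("!")
--         return token[:cut], token[cut + 1:]
--     # Quoted sheet: split the tail on escaped pairs "''"; inside the resulting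
--     # segments every remaining quote is a lone (closing) quote, so the sheet is
--     # the segments up to the first such quote re-joined with a single "'".
--     segments = token[1:].split("''")
--     pieces = []
--     rest = ""
--     for k, seg in enumerate(segments):
--         q = seg.find("'")
--         if q >= 0:
--             pieces.append(seg[:q])
--             rest = "''".join([seg[q + 1:]] + segments[k + 1:])
--             break
--         pieces.append(seg)
--     sheet = "'".join(pieces)
--     if rest.startswith("!"):
--         rest = rest[1:]
--     return sheet, rest
-- ===== Notes on version B (the rewrite author's own statement) =====
-- stated objective: alternative
-- what changed: The quoted-sheet branch no longer scans char-by-char building the name with a builder list; B splits the tail on the escape pairs "''", walks the segment list to the first lone quote, and re-joins: the sheet is the segments before it joined with "'" and the remainder is the later segments re-joined with "''"; the unquoted branch uses find+slices instead of split-unpack.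
import Mathlib
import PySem

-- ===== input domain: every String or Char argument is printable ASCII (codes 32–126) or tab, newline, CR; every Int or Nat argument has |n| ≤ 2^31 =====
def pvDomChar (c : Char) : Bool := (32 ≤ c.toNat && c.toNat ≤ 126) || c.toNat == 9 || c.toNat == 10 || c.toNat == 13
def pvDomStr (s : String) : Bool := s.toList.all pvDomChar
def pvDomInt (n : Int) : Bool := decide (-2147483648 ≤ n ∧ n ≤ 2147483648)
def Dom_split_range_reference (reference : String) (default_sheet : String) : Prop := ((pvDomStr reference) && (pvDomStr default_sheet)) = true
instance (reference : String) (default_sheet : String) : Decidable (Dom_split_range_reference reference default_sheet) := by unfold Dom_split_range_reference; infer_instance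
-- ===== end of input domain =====

-- B replaces A's simultaneous char-by-char scan-and-build of the quoted sheet name by a
-- staged split-on-"''" / walk-the-segments / re-join decomposition, and the unquoted
-- branch's split-unpack by find+slices; same asymptotic cost, a different decomposition.

-- ===== PORT A =====
-- sheet_part, ref_part = token.split("!", 1)  (unpack of the 2-element split)
def pvAUnpack2 : Option (List String) → Option (String × String)
  | some [a, b] => some (a, b)
  | _ => none

-- A's while loop over idx, as structural recursion on the suffix token[idx:];
-- returns (builder, the suffix token[idx:] at loop exit).
def pvALoop : List Char → List Char × List Char
  | [] => ([], [])
  | c :: rest =>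
    if c = '\'' then                 -- if ch == "'":
      match rest with
      | d :: rest2 =>
        if d = '\'' then             -- if idx + 1 < len(token) and token[idx+1] == "'":
          let p := pvALoop rest2
          ('\'' :: p.1, p.2)         -- builder.append("'"); idx += 2
        else ([], rest)              -- idx += 1; break
      | [] => ([], rest)             -- idx += 1; break
    else
      let p := pvALoop rest
      (c :: p.1, p.2)                -- builder.append(ch); idx += 1

def split_range_reference (reference : String) (default_sheet : String) : Option (String × String) :=
  let token := PySem.Str.strip reference
  if token = "" then none
  else if PySem.Str.isIn "!" token = false then some (default_sheet, token)
  else if token.toList.head? = some '\'' then   -- token[0] == "'" (token nonempty here)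
    let p := pvALoop (token.toList.drop 1)
    let sheet := String.ofList p.1              -- sheet = "".join(builder)
    let rest2 := match p.2 with                 -- if idx < len(token) and token[idx] == "!": idx += 1
      | '!' :: r => r
      | r => r
    some (sheet, String.ofList rest2)           -- ref_part = token[idx:]
  else
    pvAUnpack2 (PySem.Str.splitMax? token "!" 1)  -- token.split("!", 1); "!" in token so 2 parts

-- ===== PORT B =====
-- B's for-loop over the segments of token[1:].split("''"), with enumerate + break:
-- returns (pieces, rest-chars).
def pvBWalk : List (List Char) → List (List Char) × List Char
  | [] => ([], [])
  | seg :: more =>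
    let q := PySem.Chars.find seg ['\'']         -- q = seg.find("'")
    if 0 ≤ q then                                -- if q >= 0: lone closing quote
      ([seg.take q.toNat],                       -- pieces.append(seg[:q]); break
       PySem.Chars.join ['\'', '\''] (seg.drop (q.toNat + 1) :: more))
                                                 -- rest = "''".join([seg[q+1:]] + segments[k+1:])
    else
      let p := pvBWalk more
      (seg :: p.1, p.2)                          -- pieces.append(seg)

def split_range_reference_alt (reference : String) (default_sheet : String) : Option (String × String) :=
  let token := PySem.Str.strip reference
  if token = "" then none
  else if PySem.Str.isIn "!" token = false then some (default_sheet, token)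
  else if token.toList.head? ≠ some '\'' then    -- token[0] != "'"
    -- cut = token.find("!"); "!" ∈ token here, so cut ≥ 0 and the two slices are plain take/drop
    let cut := PySem.Chars.find token.toList ['!']
    some (String.ofList (token.toList.take cut.toNat), String.ofList (token.toList.drop (cut.toNat + 1)))
  else
    let segments := PySem.Chars.splitOn (token.toList.drop 1) ['\'', '\'']  -- token[1:].split("''")
    let w := pvBWalk segments
    let sheet := PySem.Chars.join ['\''] w.1                                -- "'".join(pieces)
    let rest := if PySem.Chars.startswith w.2 ['!'] then w.2.tail else w.2  -- if rest.startswith("!"): rest = rest[1:]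
    some (String.ofList sheet, String.ofList rest)

-- ===== PRECONDITION & SPEC =====
def Spec_split_range_reference (reference : String) (default_sheet : String) (out : Option (String × String)) : Prop := out = split_range_reference_alt reference default_sheet
instance (reference : String) (default_sheet : String) (out : Option (String × String)) : Decidable (Spec_split_range_reference reference default_sheet out) := by unfold Spec_split_range_reference; infer_instance

-- ===== CLAIM (what is proved, stated in full; the proofs are below) =====
def Claim_equal_split_range_reference : Prop := ∀ (reference : String) (default_sheet : String), Dom_split_range_reference reference default_sheet → Spec_split_range_reference reference default_sheet (split_range_reference reference default_sheet)

-- ===== LEMMAS AND PROOFS =====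

-- structural model of l.split("''")
def pvMySplit : List Char → List (List Char)
  | [] => [[]]
  | '\'' :: '\'' :: rest => [] :: pvMySplit rest
  | c :: rest =>
    match pvMySplit rest with
    | p :: ps => (c :: p) :: ps
    | [] => [[c]]

def pvConsFirst (x : List Char) : List (List Char) → List (List Char)
  | [] => [x]
  | p :: ps => (x ++ p) :: ps

-- structural model of the first split of l at ch: (pre, post), none iff ch ∉ l
def pvOnce (ch : Char) : List Char → Option (List Char × List Char)
  | [] => none
  | c :: rest =>
    if c = ch then some ([], rest)
    else (pvOnce ch rest).map (fun p => (c :: p.1, p.2))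

theorem pvMySplit_ne_nil (l : List Char) : pvMySplit l ≠ [] := by
  induction l using pvMySplit.induct with
  | case1 => simp [pvMySplit]
  | case2 rest ih => simp [pvMySplit]
  | case3 c rest h p ps hs ih => rw [pvMySplit.eq_def]; cases rest <;> simp_all
  | case4 c rest h hs ih => exact absurd hs ih

theorem pvMySplit_cons (c : Char) (hc : c ≠ '\'') (rest : List Char) :
    pvMySplit (c :: rest) =
      match pvMySplit rest with | p :: ps => (c :: p) :: ps | [] => [[c]] := by
  rw [pvMySplit.eq_def]
  cases rest with
  | nil => simp
  | cons d r =>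
    by_cases hd : d = '\'' <;> simp [hc, hd]

-- splitOn.go with the "''" separator computes pvMySplit
theorem pvSplitOnGo_eq : ∀ (fuel : Nat) (l cur : List Char) (acc : List (List Char)),
    l.length ≤ fuel →
    PySem.Chars.splitOn.go ['\'', '\''] fuel l cur acc =
      acc.reverse ++ pvConsFirst cur.reverse (pvMySplit l) := by
  intro fuel
  induction fuel with
  | zero =>
    intro l cur acc hl
    have : l = [] := by cases l <;> simp_all
    subst this
    simp [PySem.Chars.splitOn.go, pvMySplit, pvConsFirst]
  | succ n ih =>
    intro l cur acc hl
    cases l with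
    | nil => simp [PySem.Chars.splitOn.go, pvMySplit, pvConsFirst]
    | cons c rest =>
      rw [PySem.Chars.splitOn.go]
      by_cases hpre : List.isPrefixOf ['\'', '\''] (c :: rest) = true
      · rw [if_pos hpre]
        obtain ⟨rest2, rfl, rfl⟩ : ∃ r2, c = '\'' ∧ rest = '\'' :: r2 := by
          cases rest with
          | nil => simp [List.isPrefixOf] at hpre
          | cons d r => simp [List.isPrefixOf] at hpre; exact ⟨r, hpre.1.symm, by simp [hpre.2.symm]⟩
        have hdrop : List.drop (['\'', '\''].length) ('\'' :: '\'' :: rest2) = rest2 := rfl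
        rw [hdrop, ih _ _ _ (by simp at hl; omega)]
        rcases hs : pvMySplit rest2 with _ | ⟨p, ps⟩
        · exact absurd hs (pvMySplit_ne_nil rest2)
        · simp [pvMySplit, hs, pvConsFirst]
      · rw [if_neg hpre]
        rw [ih _ _ _ (by simp at hl; omega)]
        have hsh : pvMySplit (c :: rest) = pvConsFirst [c] (pvMySplit rest) := by
          rw [pvMySplit.eq_def]
          rcases hs : pvMySplit rest with _ | ⟨p, ps⟩
          · exact absurd hs (pvMySplit_ne_nil rest)
          · cases rest with
            | nil => simp [pvMySplit] at hs; simp [pvMySplit, hs, pvConsFirst]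
            | cons d r =>
              by_cases hc : c = '\''
              · by_cases hd : d = '\''
                · exfalso; subst hc; subst hd; simp [List.isPrefixOf] at hpre
                · subst hc; simp [hd, hs, pvConsFirst]
              · simp [hc, hs, pvConsFirst]
        rw [hsh]
        rcases hs : pvMySplit rest with _ | ⟨p, ps⟩
        · exact absurd hs (pvMySplit_ne_nil rest)
        · simp [pvConsFirst]

theorem pvSplitOn_eq (l : List Char) :
    PySem.Chars.splitOn l ['\'', '\''] = pvMySplit l := by
  rw [PySem.Chars.splitOn, pvSplitOnGo_eq (l.length + 1) l [] [] (by omega)]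
  rcases hs : pvMySplit l with _ | ⟨p, ps⟩
  · exact absurd hs (pvMySplit_ne_nil l)
  · simp [pvConsFirst]

-- "''".join(l.split("''")) = l
theorem pvJoin_mySplit (l : List Char) :
    PySem.Chars.join ['\'', '\''] (pvMySplit l) = l := by
  induction l using pvMySplit.induct with
  | case1 => simp [pvMySplit, PySem.Chars.join_singleton]
  | case2 rest ih =>
    rcases hs : pvMySplit rest with _ | ⟨p, ps⟩
    · exact absurd hs (pvMySplit_ne_nil rest)
    · rw [pvMySplit.eq_def]
      simp only []
      rw [hs] at ih ⊢
      rw [PySem.Chars.join_cons_cons]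
      simp [ih]
  | case3 c rest h p ps hs ih =>
    have hj : PySem.Chars.join ['\'', '\''] ((c :: p) :: ps) = c :: PySem.Chars.join ['\'', '\''] (p :: ps) := by
      cases ps with
      | nil => simp [PySem.Chars.join_singleton]
      | cons q qs => rw [PySem.Chars.join_cons_cons, PySem.Chars.join_cons_cons]; simp
    have hm : pvMySplit (c :: rest) = (c :: p) :: ps := by
      rw [pvMySplit.eq_def]
      cases rest with
      | nil => simp [pvMySplit] at hs; simp [pvMySplit, hs]
      | cons d r =>
        by_cases hc : c = '\''
        · by_cases hd : d = '\''
          · exact absurd (h r hc (by rw [hd])) not_false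
          · subst hc; simp [hs]
        · simp [hs]
    rw [hm, hj, hs] at *
    rw [ih]
  | case4 c rest h hs ih => exact absurd hs (pvMySplit_ne_nil rest)

-- find.go on a single-char needle, described by pvOnce
theorem pvFindGo_eq (ch : Char) : ∀ (l : List Char) (k : Nat),
    PySem.Chars.find.go [ch] l k =
      match pvOnce ch l with
      | none => -1
      | some (pre, _) => (k : Int) + pre.length := by
  intro l
  induction l with
  | nil => intro k; simp [PySem.Chars.find.go, pvOnce]
  | cons c rest ih =>
    intro k
    rw [PySem.Chars.find.go]
    by_cases hc : c = ch
    · subst hc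
      rw [if_pos (by simp [List.isPrefixOf])]
      simp [pvOnce]
    · rw [if_neg (by simp [List.isPrefixOf]; exact fun h => absurd h.symm hc)]
      rw [ih (k + 1)]
      rcases ho : pvOnce ch rest with _ | ⟨pre, post⟩
      · simp [pvOnce, hc, ho]
      · simp [pvOnce, hc, ho]; ring

theorem pvOnce_none_iff (ch : Char) (l : List Char) : pvOnce ch l = none ↔ ch ∉ l := by
  induction l with
  | nil => simp [pvOnce]
  | cons c rest ih =>
    by_cases hc : c = ch
    · subst hc; simp [pvOnce]
    · rw [pvOnce]
      rw [if_neg hc]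
      simp only [Option.map_eq_none_iff, ih, List.mem_cons, not_or]
      constructor
      · intro h; exact ⟨fun he => hc he.symm, h⟩
      · intro h; exact h.2

theorem pvOnce_decomp (ch : Char) : ∀ (l pre post : List Char),
    pvOnce ch l = some (pre, post) → l = pre ++ ch :: post := by
  intro l
  induction l with
  | nil => intro pre post h; simp [pvOnce] at h
  | cons c rest ih =>
    intro pre post h
    by_cases hc : c = ch
    · subst hc; simp [pvOnce] at h; simp [h.1.symm, h.2.symm]
    · rw [pvOnce, if_neg hc] at h
      rcases hmap : pvOnce ch rest with _ | ⟨p1, p2⟩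
      · rw [hmap] at h; simp at h
      · rw [hmap] at h
        simp only [Option.map_some, Option.some.injEq, Prod.mk.injEq] at h
        rw [← h.1, ← h.2]
        simp [ih p1 p2 hmap]

-- splitOnMax.go with the budget exhausted
theorem pvGoMax0 (ch : Char) (fuel : Nat) (l cur : List Char) (acc : List (List Char)) :
    PySem.Chars.splitOnMax.go [ch] fuel 0 l cur acc = acc.reverse ++ [cur.reverse ++ l] := by
  cases fuel with
  | zero => simp [PySem.Chars.splitOnMax.go]
  | succ n =>
    cases l with
    | nil => simp [PySem.Chars.splitOnMax.go]
    | cons c rest => simp [PySem.Chars.splitOnMax.go]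

-- splitOnMax.go with maxsplit 1, described by pvOnce
theorem pvGoMax1 (ch : Char) : ∀ (fuel : Nat) (l cur : List Char) (acc : List (List Char)),
    l.length ≤ fuel →
    PySem.Chars.splitOnMax.go [ch] fuel 1 l cur acc =
      acc.reverse ++ (match pvOnce ch l with
        | none => [cur.reverse ++ l]
        | some (pre, post) => [cur.reverse ++ pre, post]) := by
  intro fuel
  induction fuel with
  | zero =>
    intro l cur acc hl
    have : l = [] := by cases l <;> simp_all
    subst this
    simp [PySem.Chars.splitOnMax.go, pvOnce]
  | succ n ih =>
    intro l cur acc hl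
    cases l with
    | nil => simp [PySem.Chars.splitOnMax.go, pvOnce]
    | cons c rest =>
      rw [PySem.Chars.splitOnMax.go]
      by_cases hc : c = ch
      · subst hc
        rw [if_neg (by omega), if_pos (by simp [List.isPrefixOf])]
        rw [show List.drop (([c] : List Char).length) (c :: rest) = rest from rfl]
        have h10 : (1 : Nat) - 1 = 0 := rfl
        rw [h10, pvGoMax0]
        simp [pvOnce]
      · rw [if_neg (by omega), if_neg (by simp [List.isPrefixOf]; exact fun h => absurd h.symm hc)]
        rw [ih _ _ _ (by simp at hl; omega)]
        rcases ho : pvOnce ch rest with _ | ⟨pre, post⟩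
        · simp [pvOnce, hc, ho]
        · simp [pvOnce, hc, ho]

theorem pvJoin_consFirst (c : Char) (p : List Char) (ps : List (List Char)) :
    PySem.Chars.join ['\''] ((c :: p) :: ps) = c :: PySem.Chars.join ['\''] (p :: ps) := by
  cases ps with
  | nil => simp [PySem.Chars.join_singleton]
  | cons q qs => rw [PySem.Chars.join_cons_cons, PySem.Chars.join_cons_cons]; simp

-- stepping a non-quote char into the first segment of the walk
theorem pvBWalk_cons_step (c : Char) (hc : c ≠ '\'') (p : List Char) (ps : List (List Char)) :
    (pvBWalk ((c :: p) :: ps)).2 = (pvBWalk (p :: ps)).2 ∧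
    PySem.Chars.join ['\''] (pvBWalk ((c :: p) :: ps)).1
      = c :: PySem.Chars.join ['\''] (pvBWalk (p :: ps)).1 := by
  have hfp : PySem.Chars.find p ['\''] =
      (match pvOnce '\'' p with | none => -1 | some (pre, _) => ((0:Nat) : Int) + pre.length) := by
    rw [PySem.Chars.find, pvFindGo_eq]
  have hfcp : PySem.Chars.find (c :: p) ['\''] =
      (match pvOnce '\'' (c :: p) with | none => -1 | some (pre, _) => ((0:Nat) : Int) + pre.length) := by
    rw [PySem.Chars.find, pvFindGo_eq]
  rcases ho : pvOnce '\'' p with _ | ⟨pre, post⟩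
  · have hocp : pvOnce '\'' (c :: p) = none := by rw [pvOnce, if_neg hc, ho]; rfl
    rw [pvBWalk, pvBWalk]
    rw [hfp, hfcp, ho, hocp]
    simp only []
    rw [if_neg (by omega), if_neg (by omega)]
    exact ⟨rfl, pvJoin_consFirst c p _⟩
  · have hocp : pvOnce '\'' (c :: p) = some (c :: pre, post) := by rw [pvOnce, if_neg hc, ho]; rfl
    rw [pvBWalk, pvBWalk]
    rw [hfp, hfcp, ho, hocp]
    simp only []
    rw [if_pos (by positivity), if_pos (by positivity)]
    refine ⟨?_, ?_⟩
    · simp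
    · have ht : (((0:Nat):Int) + (((c :: pre).length : Nat) : Int)).toNat
          = (((0:Nat):Int) + ((pre.length : Nat) : Int)).toNat + 1 := by simp
      rw [ht, List.take_succ_cons]
      exact pvJoin_consFirst c _ _

-- A's scan-and-build and B's split/walk/re-join agree on the tail after the opening quote
theorem pvQuoted_eq (l : List Char) :
    PySem.Chars.join ['\''] (pvBWalk (pvMySplit l)).1 = (pvALoop l).1 ∧
    (pvBWalk (pvMySplit l)).2 = (pvALoop l).2 := by
  induction l using pvALoop.induct with
  | case1 => decide
  | case2 rest2 ih =>
    have hm : pvMySplit ('\'' :: '\'' :: rest2) = [] :: pvMySplit rest2 := by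
      rw [pvMySplit.eq_def]
      simp
    rcases hs : pvMySplit rest2 with _ | ⟨p, ps⟩
    · exact absurd hs (pvMySplit_ne_nil rest2)
    · rw [hm, hs]
      rw [hs] at ih
      have hw : pvBWalk ([] :: p :: ps) = ([] :: (pvBWalk (p :: ps)).1, (pvBWalk (p :: ps)).2) := by
        rw [pvBWalk]
        rw [show PySem.Chars.find ([] : List Char) ['\''] = -1 from rfl]
        simp
      rw [hw]
      rcases hw1 : (pvBWalk (p :: ps)).1 with _ | ⟨q, qs⟩
      · exfalso
        rw [pvBWalk] at hw1
        by_cases hq : 0 ≤ PySem.Chars.find p ['\'']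
        · rw [if_pos hq] at hw1; simp at hw1
        · rw [if_neg hq] at hw1; simp at hw1
      · constructor
        · rw [show PySem.Chars.join ['\''] ([] :: q :: qs) = [] ++ ['\''] ++ PySem.Chars.join ['\''] (q :: qs) from PySem.Chars.join_cons_cons _ _ _ _]
          rw [pvALoop]
          simp only []
          rw [hw1] at ih
          simp [ih.1]
        · rw [pvALoop]
          simp only []
          simp [ih.2]
  | case3 d rest2 hd =>
    have hd' : d ≠ '\'' := hd
    rcases hs : pvMySplit (d :: rest2) with _ | ⟨p, ps⟩
    · exact absurd hs (pvMySplit_ne_nil _)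
    · have hm : pvMySplit ('\'' :: d :: rest2) = ('\'' :: p) :: ps := by
        rw [pvMySplit.eq_def]
        simp [hd', hs]
      rw [hm]
      have hf : PySem.Chars.find ('\'' :: p) ['\''] = 0 := by
        rw [PySem.Chars.find, PySem.Chars.find.go]
        rw [if_pos (by simp [List.isPrefixOf])]
        simp
      rw [pvBWalk]
      simp only [hf]
      rw [if_pos (le_refl (0:Int))]
      constructor
      · rw [pvALoop]
        simp [PySem.Chars.join_singleton, hd']
      · rw [pvALoop]
        simp only []
        have : List.drop ((0 : Int).toNat + 1) ('\'' :: p) = p := by simp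
        rw [this, ← hs, pvJoin_mySplit]
        simp [hd']
  | case4 =>
    decide
  | case5 c rest hc ih =>
    have hc' : c ≠ '\'' := hc
    rcases hs : pvMySplit rest with _ | ⟨p, ps⟩
    · exact absurd hs (pvMySplit_ne_nil rest)
    · have hm : pvMySplit (c :: rest) = (c :: p) :: ps := by
        rw [pvMySplit_cons c hc', hs]
      rw [hm]
      obtain ⟨h2, h1⟩ := pvBWalk_cons_step c hc' p ps
      rw [hs] at ih
      constructor
      · rw [h1, pvALoop.eq_def]
        simp only [if_neg hc']
        cases rest <;> simp [ih.1]
      · rw [h2, pvALoop.eq_def]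
        simp only [if_neg hc']
        cases rest <;> simp [ih.2]

-- A's '!'-skip match equals B's startswith test
theorem pvBangSkip (l : List Char) :
    (match l with | '!' :: r => r | r => r) =
      (if PySem.Chars.startswith l ['!'] then l.tail else l) := by
  cases l with
  | nil => simp [PySem.Chars.startswith, List.isPrefixOf]
  | cons c r =>
    by_cases hc : c = '!'
    · subst hc; simp [PySem.Chars.startswith, List.isPrefixOf]
    · have hc2 : ¬('!' = c) := fun h => hc (Eq.symm h)
      simp [PySem.Chars.startswith, List.isPrefixOf, hc, hc2]

-- ===== VERDICT (by name: the statement is the Claim_ definition above) =====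
theorem split_range_reference_spec : Claim_equal_split_range_reference := by
  intro reference default_sheet _
  unfold Spec_split_range_reference split_range_reference split_range_reference_alt
  dsimp only
  by_cases h1 : PySem.Str.strip reference = ""
  · simp only [if_pos h1]
  by_cases h2 : PySem.Str.isIn "!" (PySem.Str.strip reference) = false
  · simp only [if_neg h1, if_pos h2]
  by_cases h3 : (PySem.Str.strip reference).toList.head? = some '\''
  · -- quoted branch on both sides
    rw [if_neg h1, if_neg h2, if_pos h3, if_neg h1, if_neg h2,
        if_neg (not_not_intro h3)]
    rw [pvSplitOn_eq]
    obtain ⟨hj, hr⟩ := pvQuoted_eq ((PySem.Str.strip reference).toList.drop 1)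
    rw [pvBangSkip, hj, hr]
  · -- unquoted branch: "!" ∈ token
    rw [if_neg h1, if_neg h2, if_neg h3, if_neg h1, if_neg h2, if_pos h3]
    have hmem : '!' ∈ (PySem.Str.strip reference).toList := by
      have := (PySem.Str.isIn_iff_infix "!" (PySem.Str.strip reference)).mp (by
        cases hii : PySem.Str.isIn "!" (PySem.Str.strip reference) with
        | false => exact absurd hii h2
        | true => rfl)
      exact this.subset (by simp)
    rcases honce : pvOnce '!' (PySem.Str.strip reference).toList with _ | ⟨pre, post⟩
    · exact absurd ((pvOnce_none_iff _ _).mp honce) (not_not_intro hmem)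
    · have hdec := pvOnce_decomp '!' _ pre post honce
      have hsplit : PySem.Str.splitMax? (PySem.Str.strip reference) "!" 1
          = some [String.ofList pre, String.ofList post] := by
        rw [PySem.Str.splitMax?, PySem.Chars.splitMax?]
        rw [if_neg (by simp)]
        rw [show ("!" : String).toList = ['!'] from rfl]
        rw [PySem.Chars.splitOnMax, if_neg (by omega)]
        rw [show ((1 : Int)).toNat = 1 from rfl]
        rw [pvGoMax1 '!' _ _ _ _ (by omega), honce]
        simp
      have hfind : PySem.Chars.find (PySem.Str.strip reference).toList ['!']
          = ((pre.length : Nat) : Int) := by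
        rw [PySem.Chars.find, pvFindGo_eq, honce]
        simp
      rw [hsplit, hfind, pvAUnpack2]
      have htake : List.take (((pre.length : Nat) : Int)).toNat (PySem.Str.strip reference).toList = pre := by
        rw [hdec]; simp
      have hdrop : List.drop ((((pre.length : Nat) : Int)).toNat + 1) (PySem.Str.strip reference).toList = post := by
        rw [hdec]
        rw [show (((pre.length : Nat) : Int)).toNat + 1 = (pre ++ ['!']).length by simp]
        rw [show pre ++ '!' :: post = (pre ++ ['!']) ++ post by simp]
        exact List.drop_left
      rw [htake, hdrop]
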